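-- pv_equiv track=rewrite | github.com/girishshirsat/practice | practiceQ55.py | calculate_pairs
-- ===== SOURCE A (Python) =====
-- def calculate_pairs(n, arr):
--     D = {}
--     C = 0
--     for i in range(n):
--         for j in range(i, n):
--             k = arr[i:j+1]
--             v = sum(k)
--             if v in D:
--                 prev_start, prev_end = D[v]
--
--                 if i > prev_end:
--                     C += 1
--             else:
--                 D[v] = (i, j)
--
--     return C
-- ===== SOURCE B (Python) =====
-- def calculate_pairs(n, arr):
--     # Enumerate every subarray once with a running sum, grouping all
--     # (start, end) occurrences by their sum; then count, per group, the
--     # later occurrences that start after the first occurrence's end.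
--     groups = {}
--     for i in range(n):
--         run = 0
--         for j in range(i, n):
--             run += arr[j]
--             groups.setdefault(run, []).append((i, j))
--     total = 0
--     for occs in groups.values():
--         ref_end = occs[0][1]
--         for start, _ in occs[1:]:
--             if start > ref_end:
--                 total += 1
--     return total
-- ===== Notes on version B (the rewrite author's own statement) =====
-- stated objective: alternative
-- what changed: Instead of re-summing each slice (O(n^3)) and counting inline against a first-occurrence dict, B enumerates subarrays once with a running sum, groups all (start,end) occurrences per sum in a dict of lists, and counts in a separate pass over the groups; Pre_ excludes n > len(arr), where A's return value is an accident of Python slice clamping and B's direct indexing raises IndexError.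
-- outside the precondition, e.g. on calculate_pairs(3, [1]): A returns 1, B raises IndexError
import Mathlib
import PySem

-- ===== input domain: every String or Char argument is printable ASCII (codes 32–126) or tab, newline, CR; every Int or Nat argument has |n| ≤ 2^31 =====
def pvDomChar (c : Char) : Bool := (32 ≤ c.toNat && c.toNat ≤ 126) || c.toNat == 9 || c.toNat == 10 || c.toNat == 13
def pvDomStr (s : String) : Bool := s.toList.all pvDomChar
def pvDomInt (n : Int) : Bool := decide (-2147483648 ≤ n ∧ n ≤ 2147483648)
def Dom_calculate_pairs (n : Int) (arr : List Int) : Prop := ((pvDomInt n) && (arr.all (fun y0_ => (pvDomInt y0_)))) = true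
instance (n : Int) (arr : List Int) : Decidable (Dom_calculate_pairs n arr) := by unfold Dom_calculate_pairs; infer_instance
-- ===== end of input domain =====

-- B replaces A's slice-resumming + inline first-occurrence counting with one running-sum
-- enumeration that groups all (start,end) occurrences per subarray sum, counted in a second pass.
-- ===== PORT A =====
def calculate_pairs (n : Int) (arr : List Int) : Int :=
  ((PySem.List.pyRange 0 n 1).foldl (fun (st : PySem.Dict Int (Int × Int) × Int) i =>
      (PySem.List.pyRange i n 1).foldl (fun st j =>
        let k := PySem.List.slice arr (some i) (some (j + 1))
        let v := k.sum
        match st.1.get? v with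
        | some pe => if i > pe.2 then (st.1, st.2 + 1) else st
        | none => (st.1.insert v (i, j), st.2)) st)
      (PySem.Dict.empty, 0)).2

-- ===== PORT B =====
-- arr[j] is total in the port via pyGetD; Pre_ guarantees j is always in range,
-- exactly where the Python B's arr[j] does not raise.
def calculate_pairs_alt (n : Int) (arr : List Int) : Int :=
  let groups := (PySem.List.pyRange 0 n 1).foldl
      (fun (g : PySem.Dict Int (List (Int × Int))) i =>
        ((PySem.List.pyRange i n 1).foldl
          (fun (st : Int × PySem.Dict Int (List (Int × Int))) j =>
            let run := st.1 + PySem.List.pyGetD arr j 0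
            (run, st.2.modify run [] (· ++ [(i, j)]))) (0, g)).2)
      PySem.Dict.empty
  groups.values.foldl (fun total occs =>
    let ref_end := (occs.headD (0, 0)).2
    occs.tail.foldl (fun t p => if p.1 > ref_end then t + 1 else t) total) 0

-- ===== PRECONDITION & SPEC =====
-- Pre_ excludes n > len(arr), inputs on which A still returns a value only because
-- Python slices clamp out-of-range bounds; B's direct indexing raises IndexError there.
def Pre_calculate_pairs (n : Int) (arr : List Int) : Prop := n ≤ (arr.length : Int)
instance (n : Int) (arr : List Int) : Decidable (Pre_calculate_pairs n arr) := by unfold Pre_calculate_pairs; infer_instance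
def pvWitness_calculate_pairs : Int × List Int := (3, [1, 2, 1])

def Spec_calculate_pairs (n : Int) (arr : List Int) (out : Int) : Prop := out = calculate_pairs_alt n arr
instance (n : Int) (arr : List Int) (out : Int) : Decidable (Spec_calculate_pairs n arr out) := by unfold Spec_calculate_pairs; infer_instance

-- ===== CLAIM (what is proved, stated in full; the proofs are below) =====
def Claim_equal_calculate_pairs : Prop := ∀ (n : Int) (arr : List Int), Dom_calculate_pairs n arr → Pre_calculate_pairs n arr → Spec_calculate_pairs n arr (calculate_pairs n arr)

-- ===== LEMMAS AND PROOFS =====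

-- helper abbreviations for the proof (sum of the slice arr[i:b], the flat enumeration,
-- A's step/count, and the per-key decomposition of B's second pass)
def pvVal (arr : List Int) (i b : Int) : Int := (PySem.List.slice arr (some i) (some b)).sum

def pvL (n : Int) (arr : List Int) : List (Int × (Int × Int)) :=
  (PySem.List.pyRange 0 n 1).flatMap
    (fun i => (PySem.List.pyRange i n 1).map (fun j => (pvVal arr i (j + 1), (i, j))))

def pvAstep (st : PySem.Dict Int (Int × Int) × Int) (p : Int × (Int × Int)) :
    PySem.Dict Int (Int × Int) × Int :=
  match st.1.get? p.1 with
  | some pe => if p.2.1 > pe.2 then (st.1, st.2 + 1) else st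
  | none => (st.1.insert p.1 p.2, st.2)

def pvMstep (d : PySem.Dict Int (List (Int × Int))) (p : Int × (Int × Int)) :
    PySem.Dict Int (List (Int × Int)) :=
  d.modify p.1 [] (· ++ [p.2])

def pvCnt (D : PySem.Dict Int (Int × Int)) : List (Int × (Int × Int)) → Int
  | [] => 0
  | p :: t =>
    match D.get? p.1 with
    | some pe => (if p.2.1 > pe.2 then 1 else 0) + pvCnt D t
    | none => pvCnt (D.insert p.1 p.2) t

def pvGt (e : Int) (l : List (Int × Int)) : Int := (l.countP (fun p => decide (e < p.1)) : Int)

def pvF (o : Option (Int × Int)) (occs : List (Int × Int)) : Int :=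
  match o with
  | some pe => pvGt pe.2 occs
  | none => pvGt (occs.headD (0, 0)).2 occs.tail

def pvS (D : PySem.Dict Int (Int × Int)) (L : List (Int × (Int × Int))) : Int :=
  ∑ k ∈ (L.map (·.1)).toFinset, pvF (D.get? k) ((L.filter (fun q => q.1 == k)).map (·.2))

-- generic folds
theorem pv_foldl_flatMap {α β γ : Type} (l : List α) (g : α → List β) (f : γ → β → γ) (init : γ) :
    (l.flatMap g).foldl f init = l.foldl (fun acc x => (g x).foldl f acc) init := by
  induction l generalizing init with
  | nil => rfl
  | cons x xs ih => simp [List.flatMap_cons, List.foldl_append, ih]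

-- ===== A side =====
theorem pvA_foldl (L : List (Int × (Int × Int))) :
    ∀ st : PySem.Dict Int (Int × Int) × Int, (L.foldl pvAstep st).2 = st.2 + pvCnt st.1 L := by
  induction L with
  | nil => intro st; simp [pvCnt]
  | cons p t ih =>
    intro st
    rw [List.foldl_cons, ih]
    show (pvAstep st p).2 + pvCnt (pvAstep st p).1 t = st.2 + pvCnt st.1 (p :: t)
    rcases hg : st.1.get? p.1 with _ | pe
    · simp only [pvAstep, pvCnt, hg]
    · simp only [pvAstep, pvCnt, hg]
      split_ifs
      · simp; omega
      · simp

theorem pvA_eq (n : Int) (arr : List Int) :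
    calculate_pairs n arr = ((pvL n arr).foldl pvAstep (PySem.Dict.empty, 0)).2 := by
  unfold calculate_pairs pvL
  rw [pv_foldl_flatMap]
  simp only [List.foldl_map]
  rfl

-- ===== B side =====
theorem pvVal_self (arr : List Int) (i : Int) (hi : 0 ≤ i) : pvVal arr i i = 0 := by
  unfold pvVal
  rw [PySem.List.slice_toNat arr hi hi]
  simp

theorem pvVal_succ (arr : List Int) (i j : Int) (hi : 0 ≤ i) (hij : i ≤ j)
    (hlt : j < (arr.length : Int)) :
    pvVal arr i (j + 1) = pvVal arr i j + PySem.List.pyGetD arr j 0 := by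
  have hj : (0:Int) ≤ j := le_trans hi hij
  have hj1 : (0:Int) ≤ j + 1 := by omega
  unfold pvVal
  rw [PySem.List.slice_toNat arr hi hj1, PySem.List.slice_toNat arr hi hj]
  have hk : (j + 1).toNat - i.toNat = (j.toNat - i.toNat) + 1 := by omega
  rw [hk, List.take_add_one, List.sum_append, List.getElem?_drop]
  have hij' : i.toNat + (j.toNat - i.toNat) = j.toNat := by omega
  rw [hij']
  have hjl : j.toNat < arr.length := by omega
  rw [PySem.List.pyGetD_eq_getElem arr 0 hj hlt]
  simp [List.getElem?_eq_getElem hjl]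

theorem pvB_inner (n : Int) (arr : List Int) (hn : n ≤ (arr.length : Int)) (i : Int) (hi : 0 ≤ i) :
    ∀ (k : Nat) (a : Int), i ≤ a → k = (n - a).toNat →
    ∀ g : PySem.Dict Int (List (Int × Int)),
      (((PySem.List.pyRange a n 1).foldl
        (fun (st : Int × PySem.Dict Int (List (Int × Int))) j =>
          let run := st.1 + PySem.List.pyGetD arr j 0
          (run, st.2.modify run [] (· ++ [(i, j)]))) (pvVal arr i a, g))).2
      = ((PySem.List.pyRange a n 1).map (fun j => (pvVal arr i (j + 1), (i, j)))).foldl pvMstep g := by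
  intro k
  induction k with
  | zero =>
    intro a ha hk g
    rw [PySem.List.pyRange_one_eq_nil (by omega : n ≤ a)]
    rfl
  | succ k ih =>
    intro a ha hk g
    have han : a < n := by omega
    rw [PySem.List.pyRange_one_cons han]
    simp only [List.foldl_cons, List.map_cons]
    have hrun : pvVal arr i a + PySem.List.pyGetD arr a 0 = pvVal arr i (a + 1) :=
      (pvVal_succ arr i a hi ha (by omega)).symm
    show (((PySem.List.pyRange (a+1) n 1).foldl _
        ((pvVal arr i a + PySem.List.pyGetD arr a 0),
         g.modify (pvVal arr i a + PySem.List.pyGetD arr a 0) [] (· ++ [(i, a)])))).2 = _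
    rw [hrun]
    exact ih (a + 1) (by omega) (by omega) _

theorem pvB_groups (n : Int) (arr : List Int) (hn : n ≤ (arr.length : Int)) :
    ((PySem.List.pyRange 0 n 1).foldl
      (fun (g : PySem.Dict Int (List (Int × Int))) i =>
        ((PySem.List.pyRange i n 1).foldl
          (fun (st : Int × PySem.Dict Int (List (Int × Int))) j =>
            let run := st.1 + PySem.List.pyGetD arr j 0
            (run, st.2.modify run [] (· ++ [(i, j)]))) (0, g)).2)
      PySem.Dict.empty)
    = (pvL n arr).foldl pvMstep PySem.Dict.empty := by
  unfold pvL
  rw [pv_foldl_flatMap]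
  apply PySem.List.foldl_congr_mem
  intro g i hi
  have h0 : (0 : Int) ≤ i := ((PySem.List.mem_pyRange_one).1 hi).1
  have := pvB_inner n arr hn i h0 (n - i).toNat i le_rfl rfl g
  rw [pvVal_self arr i h0] at this
  exact this

theorem pvGt_cons (e : Int) (x : Int × Int) (l : List (Int × Int)) :
    pvGt e (x :: l) = (if e < x.1 then 1 else 0) + pvGt e l := by
  unfold pvGt
  rw [List.countP_cons]
  by_cases h : e < x.1
  · simp [h]
    omega
  · simp [h]

theorem pv_foldl_gt (e : Int) (l : List (Int × Int)) :
    ∀ t0 : Int, l.foldl (fun t p => if p.1 > e then t + 1 else t) t0 = t0 + pvGt e l := by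
  induction l with
  | nil => intro t0; simp [pvGt]
  | cons x xs ih =>
    intro t0
    rw [List.foldl_cons, ih, pvGt_cons]
    split_ifs <;> omega

theorem pvB_eq (n : Int) (arr : List Int) (hn : n ≤ (arr.length : Int)) :
    calculate_pairs_alt n arr = pvS PySem.Dict.empty (pvL n arr) := by
  simp only [calculate_pairs_alt]
  rw [pvB_groups n arr hn]
  have hnd : ((pvL n arr).foldl pvMstep (PySem.Dict.empty : PySem.Dict Int (List (Int × Int)))).keys.Nodup := by
    unfold pvMstep
    exact PySem.Dict.nodup_keys_foldl_modify_key (pvL n arr)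
      (fun (p : Int × Int × Int) => p.1) []
      (fun (d : PySem.Dict Int (List (Int × Int))) (p : Int × Int × Int) (l : List (Int × Int)) => l ++ [p.2])
      PySem.Dict.empty (by simp)
  have hkeys : ((pvL n arr).foldl pvMstep (PySem.Dict.empty : PySem.Dict Int (List (Int × Int)))).keys
      = PySem.List.dedup ((pvL n arr).map (·.1)) := by
    have h := PySem.Dict.keys_foldl_modify_key (pvL n arr)
      (fun (p : Int × Int × Int) => p.1) ([] : List (Int × Int))
      (fun (d : PySem.Dict Int (List (Int × Int))) (p : Int × Int × Int) (l : List (Int × Int)) => l ++ [p.2])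
      PySem.Dict.empty
    unfold pvMstep
    simpa [PySem.Dict.keys_empty, PySem.Set.update_nil_left, PySem.List.dedup_eq_ofList] using h
  have hgetD : ∀ k, ((pvL n arr).foldl pvMstep (PySem.Dict.empty : PySem.Dict Int (List (Int × Int)))).getD k []
      = ((pvL n arr).filter (fun q => q.1 == k)).map (·.2) := by
    intro k
    unfold pvMstep
    rw [PySem.Dict.getD_foldl_modify_append, PySem.Dict.getD_empty, List.nil_append]
  simp only [pv_foldl_gt]
  rw [PySem.List.foldl_add]
  rw [PySem.Dict.values_eq_map_keys _ hnd ([] : List (Int × Int)), List.map_map]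
  rw [hkeys]
  rw [← List.sum_toFinset _ (PySem.List.nodup_dedup _), Int.zero_add]
  have hfs : (PySem.List.dedup ((pvL n arr).map (·.1))).toFinset = ((pvL n arr).map (·.1)).toFinset := by
    apply Finset.ext
    intro a
    simp
  rw [hfs]
  unfold pvS
  apply Finset.sum_congr rfl
  intro k _
  rw [PySem.Dict.get?_empty]
  simp only [Function.comp, hgetD]
  rfl

-- ===== the counting argument =====
theorem pv_sum_step (St : Finset Int) (k0 : Int) (F G : Int → Int)
    (h : ∀ k, k ≠ k0 → G k = F k) (h0 : k0 ∉ St → F k0 = 0) :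
    ∑ k ∈ insert k0 St, G k = G k0 + (∑ k ∈ St, F k) - F k0 := by
  by_cases hk : k0 ∈ St
  · rw [Finset.insert_eq_self.2 hk]
    rw [← Finset.sum_erase_add _ _ hk, ← Finset.sum_erase_add _ F hk]
    have : ∑ k ∈ St.erase k0, G k = ∑ k ∈ St.erase k0, F k :=
      Finset.sum_congr rfl (fun k hke => h k (Finset.ne_of_mem_erase hke))
    omega
  · rw [Finset.sum_insert hk, h0 hk]
    have : ∑ k ∈ St, G k = ∑ k ∈ St, F k :=
      Finset.sum_congr rfl (fun k hke => h k (by rintro rfl; exact hk hke))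
    omega

theorem pvCnt_eq_pvS (L : List (Int × (Int × Int))) :
    ∀ D : PySem.Dict Int (Int × Int), pvCnt D L = pvS D L := by
  induction L with
  | nil => intro D; simp [pvCnt, pvS]
  | cons p t ih =>
    intro D
    have hmap : (((p :: t).map (·.1)).toFinset : Finset Int)
        = insert p.1 ((t.map (·.1)).toFinset : Finset Int) := by simp
    have hgrpne : ∀ k : Int, k ≠ p.1 → ((p :: t).filter (fun q => q.1 == k)).map (·.2)
        = ((t.filter (fun q => q.1 == k)).map (·.2) : List (Int × Int)) := by
      intro k hk
      rw [List.filter_cons]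
      simp [Ne.symm hk]
    have hgrpeq : ((p :: t).filter (fun q => q.1 == p.1)).map (·.2)
        = p.2 :: ((t.filter (fun q => q.1 == p.1)).map (·.2) : List (Int × Int)) := by
      rw [List.filter_cons]
      simp
    have hempty : p.1 ∉ ((t.map (·.1)).toFinset : Finset Int) →
        ((t.filter (fun q => q.1 == p.1)).map (·.2) : List (Int × Int)) = [] := by
      intro h
      have hnil : t.filter (fun q => q.1 == p.1) = [] := by
        rw [List.filter_eq_nil_iff]
        intro q hq hbeq
        apply h
        simp only [List.mem_toFinset, List.mem_map]
        exact ⟨q, hq, by simpa using hbeq⟩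
      rw [hnil]; rfl
    rcases hg : D.get? p.1 with _ | pe
    · have hstep : pvCnt D (p :: t) = pvCnt (D.insert p.1 p.2) t := by
        simp only [pvCnt, hg]
      rw [hstep, ih]
      unfold pvS
      rw [hmap]
      rw [pv_sum_step _ p.1
        (fun k => pvF ((D.insert p.1 p.2).get? k) ((t.filter (fun q => q.1 == k)).map (·.2)))
        (fun k => pvF (D.get? k) (((p :: t).filter (fun q => q.1 == k)).map (·.2)))
        (by
          intro k hk
          simp only [hgrpne k hk, PySem.Dict.get?_insert_of_ne _ _ hk])
        (by
          intro h
          simp [hempty h, PySem.Dict.get?_insert_self, pvF, pvGt])]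
      simp only [hgrpeq, hg, PySem.Dict.get?_insert_self, pvF, List.headD_cons, List.tail_cons]
      omega
    · have hstep : pvCnt D (p :: t) = (if p.2.1 > pe.2 then 1 else 0) + pvCnt D t := by
        simp only [pvCnt, hg]
      rw [hstep, ih]
      unfold pvS
      rw [hmap]
      rw [pv_sum_step _ p.1
        (fun k => pvF (D.get? k) ((t.filter (fun q => q.1 == k)).map (·.2)))
        (fun k => pvF (D.get? k) (((p :: t).filter (fun q => q.1 == k)).map (·.2)))
        (by intro k hk; simp only [hgrpne k hk])
        (by
          intro h
          simp [hempty h, hg, pvF, pvGt])]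
      simp only [hgrpeq, hg, pvF, pvGt_cons]
      split_ifs <;> omega

-- ===== VERDICT (by name: the statement is the Claim_ definition above) =====
theorem calculate_pairs_spec : Claim_equal_calculate_pairs := by
  intro n arr _ hpre
  unfold Spec_calculate_pairs
  rw [pvA_eq, pvB_eq n arr hpre, pvA_foldl, pvCnt_eq_pvS]
  simp
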